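-- pv_equiv track=rewrite | github.com/tanmay-netizen17/spectraguard | backend/detectors/url_detector.py | _has_digit_substitution
-- ===== SOURCE A (Python) =====
-- DIGIT_SUBS = {"0": "o", "1": "i", "3": "e", "4": "a", "5": "s", "7": "t"}
--
-- def _has_digit_substitution(domain: str) -> bool:
--     """
--     Detect leet-speak digit-for-letter substitutions like 'g00gle' or 'payp4l'.
--     Requires the digit to be adjacent to at least one letter (avoids false-positives
--     on legitimate numeric domain labels).
--     """
--     for digit in DIGIT_SUBS:
--         for i, ch in enumerate(domain):
--             if ch == digit:
--                 context = domain[max(0, i - 1): i + 2]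
--                 if any(c.isalpha() for c in context):
--                     return True
--     return False
-- ===== SOURCE B (Python) =====
-- DIGIT_SUBS = {"0": "o", "1": "i", "3": "e", "4": "a", "5": "s", "7": "t"}
--
-- def _has_digit_substitution(domain: str) -> bool:
--     # A substitution digit is flagged iff it sits next to a letter; since the
--     # digits themselves are never alphabetic, that is exactly: some ADJACENT
--     # PAIR of characters consists of a DIGIT_SUBS key and a letter (either order).
--     return any(
--         (a in DIGIT_SUBS and b.isalpha()) or (b in DIGIT_SUBS and a.isalpha())
--         for a, b in zip(domain, domain[1:])
--     )
-- ===== Notes on version B (the rewrite author's own statement) =====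
-- stated objective: alternative
-- what changed: B drops A's per-key rescans, index arithmetic and context slicing entirely: it scans the adjacent character pairs zip(domain, domain[1:]) once and flags a pair made of a DIGIT_SUBS key and a letter in either order, which is equivalent because the substitution digits are never alphabetic.
import Mathlib
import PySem

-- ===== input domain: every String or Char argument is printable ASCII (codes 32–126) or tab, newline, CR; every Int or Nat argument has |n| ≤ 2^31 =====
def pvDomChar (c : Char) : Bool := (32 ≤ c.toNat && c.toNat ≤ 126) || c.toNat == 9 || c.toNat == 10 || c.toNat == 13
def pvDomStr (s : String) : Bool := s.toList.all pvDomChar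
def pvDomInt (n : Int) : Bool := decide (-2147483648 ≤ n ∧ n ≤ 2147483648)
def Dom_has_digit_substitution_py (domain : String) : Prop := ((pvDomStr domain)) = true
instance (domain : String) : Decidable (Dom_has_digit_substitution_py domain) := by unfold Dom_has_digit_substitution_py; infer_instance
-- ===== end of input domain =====

-- B replaces A's per-key rescans with one scan of the adjacent pairs zip(domain, domain[1:]),
-- flagging a key-next-to-letter pair in either order (sound since the keys are never letters).

-- ===== PORT A =====
-- keys of the module constant DIGIT_SUBS, in dict insertion order
def pvDigitKeys : List Char := ['0', '1', '3', '4', '5', '7']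

def has_digit_substitution_py (domain : String) : Bool :=
  pvDigitKeys.any (fun digit =>
    (PySem.List.enumerate domain.toList 0).any (fun p =>
      if p.2 == digit then
        (PySem.List.slice domain.toList (some (max 0 (p.1 - 1))) (some (p.1 + 2))).any
          PySem.Chars.isalpha
      else false))

-- ===== PORT B =====
def has_digit_substitution_py_alt (domain : String) : Bool :=
  (domain.toList.zip (PySem.List.slice domain.toList (some 1) none)).any (fun p =>
    (pvDigitKeys.contains p.1 && PySem.Chars.isalpha p.2) ||
    (pvDigitKeys.contains p.2 && PySem.Chars.isalpha p.1))

-- ===== PRECONDITION & SPEC =====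
def Spec_has_digit_substitution_py (domain : String) (out : Bool) : Prop := out = has_digit_substitution_py_alt domain
instance (domain : String) (out : Bool) : Decidable (Spec_has_digit_substitution_py domain out) := by unfold Spec_has_digit_substitution_py; infer_instance

-- ===== CLAIM (what is proved, stated in full; the proofs are below) =====
def Claim_equal_has_digit_substitution_py : Prop := ∀ (domain : String), Dom_has_digit_substitution_py domain → Spec_has_digit_substitution_py domain (has_digit_substitution_py domain)

-- ===== LEMMAS AND PROOFS =====

-- the substitution keys are digits, never alphabetic
theorem pvDigitKeys_not_alpha : ∀ c ∈ pvDigitKeys, PySem.Chars.isalpha c = false := by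
  intro c hc
  simp only [pvDigitKeys, List.mem_cons, List.not_mem_nil, or_false] at hc
  rcases hc with rfl | rfl | rfl | rfl | rfl | rfl <;> rfl

-- any over a drop/take window, in terms of indices of the original list
theorem any_drop_take_iff {α : Type} (l : List α) (a m : Nat) (f : α → Bool) :
    (∃ x ∈ (l.drop a).take m, f x = true) ↔
      ∃ k, ∃ h : k < l.length, a ≤ k ∧ k < a + m ∧ f l[k] = true := by
  constructor
  · rintro ⟨x, hx, hfx⟩
    obtain ⟨j, hj, rfl⟩ := List.mem_iff_getElem.mp hx
    have hj' := hj
    simp only [List.length_take, List.length_drop] at hj'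
    have hjlen : a + j < l.length := by omega
    refine ⟨a + j, hjlen, by omega, by omega, ?_⟩
    have : ((l.drop a).take m)[j] = l[a + j] := by
      rw [List.getElem_take, List.getElem_drop]
    rwa [this] at hfx
  · rintro ⟨k, hk, hak, hkm, hfk⟩
    have hjlen : k - a < ((l.drop a).take m).length := by
      simp only [List.length_take, List.length_drop]; omega
    refine ⟨((l.drop a).take m)[k - a], List.getElem_mem _, ?_⟩
    have : ((l.drop a).take m)[k - a] = l[a + (k - a)] := by
      rw [List.getElem_take, List.getElem_drop]
    rw [this]
    have : a + (k - a) = k := by omega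
    simp_all

-- A over the character list, characterised by indices
theorem portA_iff (l : List Char) :
    (pvDigitKeys.any (fun digit =>
      (PySem.List.enumerate l 0).any (fun p =>
        if p.2 == digit then
          (PySem.List.slice l (some (max 0 (p.1 - 1))) (some (p.1 + 2))).any
            PySem.Chars.isalpha
        else false))) = true ↔
      ∃ i, ∃ h : i < l.length, l[i] ∈ pvDigitKeys ∧
        ∃ k, ∃ hk : k < l.length, i ≤ k + 1 ∧ k ≤ i + 1 ∧ PySem.Chars.isalpha l[k] = true := by
  simp only [List.any_eq_true, Bool.if_false_right, Bool.and_eq_true, beq_iff_eq,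
    decide_eq_true_eq, PySem.List.mem_enumerate_iff]
  constructor
  · rintro ⟨d, hd, p, ⟨i, hi, rfl⟩, hpd, hsl⟩
    simp only [zero_add] at hpd hsl
    have hb : (max 0 ((i : Int) - 1)) = ((i - 1 : Nat) : Int) := by omega
    have hb2 : ((i : Int) + 2) = ((i + 2 : Nat) : Int) := by omega
    rw [hb, hb2, PySem.List.slice_natCast] at hsl
    obtain ⟨k, hk, hak, hkm, hfk⟩ := (any_drop_take_iff l (i-1) (i+2-(i-1)) _).mp hsl
    exact ⟨i, hi, by rw [hpd]; exact hd, k, hk, by omega, by omega, hfk⟩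
  · rintro ⟨i, hi, hkey, k, hk, hik, hki, hfk⟩
    refine ⟨l[i], hkey, (0 + i, l[i]), ⟨i, hi, rfl⟩, rfl, ?_⟩
    simp only [zero_add]
    have hb : (max 0 ((i : Int) - 1)) = ((i - 1 : Nat) : Int) := by omega
    have hb2 : ((i : Int) + 2) = ((i + 2 : Nat) : Int) := by omega
    rw [hb, hb2, PySem.List.slice_natCast]
    exact (any_drop_take_iff l (i-1) (i+2-(i-1)) _).mpr ⟨k, hk, by omega, by omega, hfk⟩

-- B over the character list, characterised by indices
theorem portB_iff (l : List Char) :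
    ((l.zip (PySem.List.slice l (some 1) none)).any (fun p =>
      (pvDigitKeys.contains p.1 && PySem.Chars.isalpha p.2) ||
      (pvDigitKeys.contains p.2 && PySem.Chars.isalpha p.1))) = true ↔
      ∃ j, ∃ h : j + 1 < l.length,
        ((l[j] ∈ pvDigitKeys ∧ PySem.Chars.isalpha l[j+1] = true) ∨
         (l[j+1] ∈ pvDigitKeys ∧ PySem.Chars.isalpha l[j] = true)) := by
  have h1 : PySem.List.slice l (some 1) none = l.drop 1 := by
    exact_mod_cast PySem.List.slice_from_natCast l 1
  rw [h1, List.any_eq_true]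
  constructor
  · rintro ⟨x, hx, hfx⟩
    obtain ⟨j, hj, rfl⟩ := List.mem_iff_getElem.mp hx
    have hjlen : j + 1 < l.length := by
      simp only [List.length_zip, List.length_drop] at hj; omega
    rw [List.getElem_zip] at hfx
    simp only [Bool.or_eq_true, Bool.and_eq_true, List.contains_eq_mem, decide_eq_true_eq,
      List.getElem_drop] at hfx
    refine ⟨j, hjlen, ?_⟩
    have e : 1 + j = j + 1 := Nat.add_comm 1 j
    simp only [e] at hfx
    exact hfx
  · rintro ⟨j, hj, hcase⟩
    have hjz : j < (l.zip (l.drop 1)).length := by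
      simp only [List.length_zip, List.length_drop]; omega
    refine ⟨(l.zip (l.drop 1))[j], List.getElem_mem _, ?_⟩
    rw [List.getElem_zip]
    simp only [Bool.or_eq_true, Bool.and_eq_true, List.contains_eq_mem, decide_eq_true_eq,
      List.getElem_drop]
    have e : 1 + j = j + 1 := Nat.add_comm 1 j
    simp only [e]
    exact hcase

-- ===== VERDICT (by name: the statement is the Claim_ definition above) =====
theorem has_digit_substitution_py_spec : Claim_equal_has_digit_substitution_py := by
  intro domain _
  unfold Spec_has_digit_substitution_py has_digit_substitution_py has_digit_substitution_py_alt
  set l := domain.toList with hl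
  rw [Bool.eq_iff_iff, portA_iff, portB_iff]
  constructor
  · rintro ⟨i, hi, hkey, k, hk, hik, hki, hfk⟩
    have hne : k ≠ i := by
      intro h; subst h
      rw [pvDigitKeys_not_alpha _ hkey] at hfk; exact absurd hfk (by simp)
    rcases Nat.lt_or_ge k i with hlt | hge
    · -- k = i - 1
      have hk1 : k + 1 = i := by omega
      exact ⟨k, by omega, Or.inr ⟨by simp_all, hfk⟩⟩
    · -- k = i + 1
      have hk1 : k = i + 1 := by omega
      subst hk1
      exact ⟨i, by omega, Or.inl ⟨hkey, hfk⟩⟩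
  · rintro ⟨j, hj, hcase⟩
    rcases hcase with ⟨hkey, hfa⟩ | ⟨hkey, hfa⟩
    · exact ⟨j, by omega, hkey, j + 1, hj, by omega, by omega, hfa⟩
    · exact ⟨j + 1, hj, hkey, j, by omega, by omega, by omega, hfa⟩
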